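-- pv_equiv track=rewrite | github.com/jero98772/DiaNA | diana.py | extract_less_present_pattern_by_len
-- ===== SOURCE A (Python) =====
-- def extract_less_present_pattern_by_len(list_total_patterns_by_pattern):
--     less_present_patterns_by_len_list = {}
--     for k, v in list_total_patterns_by_pattern.items():
--         pattern_len = len(k)
--         if pattern_len in less_present_patterns_by_len_list.keys():
--             if v < less_present_patterns_by_len_list[pattern_len][1]:
--                 less_present_patterns_by_len_list[pattern_len] = k, v
--         else:
--             less_present_patterns_by_len_list[pattern_len] = k, v
--     return less_present_patterns_by_len_list
-- ===== SOURCE B (Python) =====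
-- def extract_less_present_pattern_by_len(list_total_patterns_by_pattern):
--     groups = {}
--     for k, v in list_total_patterns_by_pattern.items():
--         groups.setdefault(len(k), []).append((k, v))
--     return {length: min(pairs, key=lambda kv: kv[1])
--             for length, pairs in groups.items()}
-- ===== Notes on version B (the rewrite author's own statement) =====
-- stated objective: alternative
-- what changed: Replaces the one-pass running-minimum dict update with a two-phase group-then-reduce: first bucket the (pattern, count) pairs by pattern length into ordered lists, then pick each bucket's minimum with min(key=count), whose first-minimum tie-break reproduces the strict-< rule.
import Mathlib
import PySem

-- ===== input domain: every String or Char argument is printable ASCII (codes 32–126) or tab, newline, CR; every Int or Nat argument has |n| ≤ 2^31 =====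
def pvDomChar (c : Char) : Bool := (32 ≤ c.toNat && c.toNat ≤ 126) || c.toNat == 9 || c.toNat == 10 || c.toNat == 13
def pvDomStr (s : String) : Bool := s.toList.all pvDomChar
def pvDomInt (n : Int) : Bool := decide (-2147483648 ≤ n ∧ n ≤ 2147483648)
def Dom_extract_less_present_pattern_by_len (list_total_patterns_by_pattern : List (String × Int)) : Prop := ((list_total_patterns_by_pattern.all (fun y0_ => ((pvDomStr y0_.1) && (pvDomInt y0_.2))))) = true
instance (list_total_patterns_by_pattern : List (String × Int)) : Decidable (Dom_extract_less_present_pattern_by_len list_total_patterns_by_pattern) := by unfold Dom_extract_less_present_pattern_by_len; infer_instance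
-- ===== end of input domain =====

-- B replaces A's one-pass running-minimum dict with a group-by-length pass followed by a per-bucket min (alternative decomposition, same cost).


-- ===== PORT A =====
def extract_less_present_pattern_by_len (list_total_patterns_by_pattern : List (String × Int)) : List (Int × String × Int) :=
  let d := list_total_patterns_by_pattern.foldl
    (fun (d : PySem.Dict Int (String × Int)) kv =>
      let pattern_len := PySem.Str.len kv.1
      if d.contains pattern_len then
        -- inside the guard d[pattern_len] is present; getD's default is never used
        if kv.2 < (d.getD pattern_len ("", 0)).2 then d.insert pattern_len (kv.1, kv.2) else d
      else d.insert pattern_len (kv.1, kv.2))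
    PySem.Dict.empty
  d.items

-- ===== PORT B =====
-- B-side helper: min(pairs, key=lambda kv: kv[1]); buckets are nonempty so the default is never used
def pvMinByCount (ps : List (String × Int)) : String × Int :=
  (PySem.List.min? ps (fun kv => kv.2)).getD ("", 0)

def extract_less_present_pattern_by_len_alt (list_total_patterns_by_pattern : List (String × Int)) : List (Int × String × Int) :=
  let groups := list_total_patterns_by_pattern.foldl
    (fun (g : PySem.Dict Int (List (String × Int))) kv =>
      g.modify (PySem.Str.len kv.1) [] (· ++ [kv]))
    PySem.Dict.empty
  groups.items.map (fun p => (p.1, pvMinByCount p.2))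

-- ===== PRECONDITION & SPEC =====
def Spec_extract_less_present_pattern_by_len (list_total_patterns_by_pattern : List (String × Int)) (out : List (Int × String × Int)) : Prop := out = extract_less_present_pattern_by_len_alt list_total_patterns_by_pattern
instance (list_total_patterns_by_pattern : List (String × Int)) (out : List (Int × String × Int)) : Decidable (Spec_extract_less_present_pattern_by_len list_total_patterns_by_pattern out) := by unfold Spec_extract_less_present_pattern_by_len; infer_instance

-- ===== CLAIM (what is proved, stated in full; the proofs are below) =====
def Claim_equal_extract_less_present_pattern_by_len : Prop := ∀ (list_total_patterns_by_pattern : List (String × Int)), Dom_extract_less_present_pattern_by_len list_total_patterns_by_pattern → Spec_extract_less_present_pattern_by_len list_total_patterns_by_pattern (extract_less_present_pattern_by_len list_total_patterns_by_pattern)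

-- ===== LEMMAS AND PROOFS =====

-- min over a bucket extended on the right = A's running-minimum update
theorem pvMinByCount_append (ps : List (String × Int)) (h : ps ≠ []) (x : String × Int) :
    pvMinByCount (ps ++ [x]) = if x.2 < (pvMinByCount ps).2 then x else pvMinByCount ps := by
  obtain ⟨m, hm⟩ : ∃ m, PySem.List.min? ps (fun kv => kv.2) = some m := by
    cases hmm : PySem.List.min? ps (fun kv => kv.2) with
    | none => exact absurd ((PySem.List.min?_eq_none_iff ps _).mp hmm) h
    | some m => exact ⟨m, rfl⟩
  unfold pvMinByCount
  unfold PySem.List.min? at *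
  rw [List.foldl_append, hm]
  simp only [List.foldl_cons, List.foldl_nil, Option.getD_some]
  split_ifs <;> rfl

-- the loop invariant: A's dict is the bucket dict with each bucket reduced by pvMinByCount
theorem pv_inv (l : List (String × Int)) :
    ∀ (dA : PySem.Dict Int (String × Int)) (g : PySem.Dict Int (List (String × Int))),
    dA.items = g.items.map (fun p => (p.1, pvMinByCount p.2)) →
    g.keys.Nodup →
    (∀ p ∈ g.items, p.2 ≠ []) →
    (l.foldl
      (fun (d : PySem.Dict Int (String × Int)) kv =>
        let pattern_len := PySem.Str.len kv.1
        if d.contains pattern_len then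
          if kv.2 < (d.getD pattern_len ("", 0)).2 then d.insert pattern_len (kv.1, kv.2) else d
        else d.insert pattern_len (kv.1, kv.2)) dA).items
    = (l.foldl
        (fun (g : PySem.Dict Int (List (String × Int))) kv =>
          g.modify (PySem.Str.len kv.1) [] (· ++ [kv])) g).items.map
        (fun p => (p.1, pvMinByCount p.2)) := by
  induction l with
  | nil => intro dA g hitems _ _; simpa using hitems
  | cons kv t ih =>
    intro dA g hitems hnd hne
    simp only [List.foldl_cons]
    have hkeys : dA.keys = g.keys := by
      simp [PySem.Dict.keys, hitems]
    have hcont : dA.contains (PySem.Str.len kv.1) = g.contains (PySem.Str.len kv.1) := by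
      rw [PySem.Dict.contains_eq_decide_mem_keys, PySem.Dict.contains_eq_decide_mem_keys, hkeys]
    by_cases hc : g.contains (PySem.Str.len kv.1) = true
    · -- the length is already a key
      obtain ⟨ps, hps⟩ : ∃ ps, g.get? (PySem.Str.len kv.1) = some ps := by
        cases hgg : g.get? (PySem.Str.len kv.1) with
        | none => rw [(PySem.Dict.get?_eq_none_iff_contains g _).mp hgg] at hc; exact absurd hc (by simp)
        | some ps => exact ⟨ps, rfl⟩
      have hmem : ((PySem.Str.len kv.1), ps) ∈ g.items := PySem.Dict.mem_items_of_get?_eq_some g hps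
      have hpsne : ps ≠ [] := hne _ hmem
      have hAmem : ((PySem.Str.len kv.1), pvMinByCount ps) ∈ dA.items := by
        rw [hitems]; exact List.mem_map.mpr ⟨_, hmem, rfl⟩
      have hAnd : dA.keys.Nodup := by rw [hkeys]; exact hnd
      have hAgetD : dA.getD (PySem.Str.len kv.1) ("", 0) = pvMinByCount ps := by
        rw [PySem.Dict.getD, PySem.Dict.get?_of_mem_items dA hAmem hAnd]; rfl
      have huniq : ∀ p ∈ g.items, p.1 = PySem.Str.len kv.1 → p = ((PySem.Str.len kv.1), ps) := by
        intro p hp hp1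
        obtain ⟨a, b⟩ := p
        simp only at hp1; subst hp1
        have := PySem.Dict.get?_of_mem_items g hp hnd
        rw [hps] at this
        simp only [Option.some.injEq] at this
        rw [this]
      have hg' : g.modify (PySem.Str.len kv.1) [] (· ++ [kv]) = g.insert (PySem.Str.len kv.1) (ps ++ [kv]) := by
        rw [PySem.Dict.modify, PySem.Dict.getD, hps]; rfl
      have hgitems : (g.insert (PySem.Str.len kv.1) (ps ++ [kv])).items
          = g.items.map (fun p => if p.1 == PySem.Str.len kv.1 then ((PySem.Str.len kv.1), ps ++ [kv]) else p) :=
        PySem.Dict.items_insert_of_contains g _ hc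
      have hgnd : (g.insert (PySem.Str.len kv.1) (ps ++ [kv])).keys.Nodup := by
        have : (g.insert (PySem.Str.len kv.1) (ps ++ [kv])).keys = g.keys := by
          rw [PySem.Dict.keys, hgitems, List.map_map, PySem.Dict.keys]
          refine List.map_congr_left ?_
          intro p _
          simp only [Function.comp_apply]
          split_ifs with h1
          · exact (eq_of_beq h1).symm
          · rfl
        rw [this]; exact hnd
      have hgne : ∀ p ∈ (g.insert (PySem.Str.len kv.1) (ps ++ [kv])).items, p.2 ≠ [] := by
        rw [hgitems]
        intro p hp
        obtain ⟨q, hq, hqe⟩ := List.mem_map.mp hp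
        subst hqe
        by_cases h1 : (q.1 == PySem.Str.len kv.1) = true
        · rw [if_pos h1]; simp
        · rw [if_neg h1]; exact hne q hq
      rw [hcont, hc, if_pos rfl, hAgetD, hg']
      by_cases hlt : kv.2 < (pvMinByCount ps).2
      · rw [if_pos hlt]
        refine ih _ _ ?_ hgnd hgne
        rw [PySem.Dict.items_insert_of_contains dA (kv.1, kv.2) (hcont.trans hc), hitems,
          List.map_map, hgitems, List.map_map]
        refine List.map_congr_left ?_
        intro p hp
        by_cases h1 : p.1 = PySem.Str.len kv.1
        · have hpe := huniq p hp h1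
          subst hpe
          simp only [Function.comp_apply, beq_self_eq_true, if_pos]
          rw [pvMinByCount_append ps hpsne kv, if_pos hlt]
        · simp only [PySem.Str.len] at h1
          simp only [Function.comp_apply, PySem.Str.len, beq_iff_eq]
          simp only [if_neg h1]
      · rw [if_neg hlt]
        refine ih _ _ ?_ hgnd hgne
        rw [hitems, hgitems, List.map_map]
        refine List.map_congr_left ?_
        intro p hp
        by_cases h1 : p.1 = PySem.Str.len kv.1
        · have hpe := huniq p hp h1
          subst hpe
          simp only [Function.comp_apply, beq_self_eq_true, if_pos]
          rw [pvMinByCount_append ps hpsne kv, if_neg hlt]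
        · simp only [PySem.Str.len] at h1
          simp only [Function.comp_apply, PySem.Str.len, beq_iff_eq]
          simp only [if_neg h1]
    · -- fresh length
      have hcf : g.contains (PySem.Str.len kv.1) = false := by
        cases h : g.contains (PySem.Str.len kv.1)
        · rfl
        · exact absurd h hc
      have hg' : g.modify (PySem.Str.len kv.1) [] (· ++ [kv]) = g.insert (PySem.Str.len kv.1) ([] ++ [kv]) := by
        rw [PySem.Dict.modify, PySem.Dict.getD, (PySem.Dict.get?_eq_none_iff_contains g _).mpr hcf]; rfl
      have hgitems : (g.insert (PySem.Str.len kv.1) ([] ++ [kv])).items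
          = g.items ++ [((PySem.Str.len kv.1), [kv])] :=
        PySem.Dict.items_insert_of_not_contains g _ hcf
      rw [hcont, hcf, if_neg (by simp), hg']
      refine ih _ _ ?_ ?_ ?_
      · rw [PySem.Dict.items_insert_of_not_contains dA (kv.1, kv.2) (hcont.trans hcf), hitems, hgitems]
        rw [List.map_append]
        simp [pvMinByCount, PySem.List.min?]
      · rw [PySem.Dict.keys, hgitems, List.map_append]
        have hnm : PySem.Str.len kv.1 ∉ g.keys := by
          have := PySem.Dict.contains_eq_decide_mem_keys g (PySem.Str.len kv.1)
          rw [hcf] at this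
          simpa using this.symm
        rw [List.nodup_append]
        refine ⟨hnd, by simp, ?_⟩
        intro a ha b hb
        rw [List.map_singleton, List.mem_singleton] at hb
        subst hb
        intro hab
        rw [hab] at ha
        refine hnm ?_
        simpa [PySem.Dict.keys, PySem.Str.len] using ha
      · rw [hgitems]
        intro p hp
        rcases List.mem_append.mp hp with h | h
        · exact hne p h
        · simp at h; rw [h]; simp

-- ===== VERDICT (by name: the statement is the Claim_ definition above) =====
theorem extract_less_present_pattern_by_len_spec : Claim_equal_extract_less_present_pattern_by_len := by
  intro l _
  unfold Spec_extract_less_present_pattern_by_len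
  unfold extract_less_present_pattern_by_len extract_less_present_pattern_by_len_alt
  exact (pv_inv l PySem.Dict.empty PySem.Dict.empty rfl (by simp [PySem.Dict.keys, PySem.Dict.empty]) (by simp [PySem.Dict.empty])).symm ▸ rfl
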